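-- pv_equiv track=rewrite | github.com/austral-prog/tp-6-loops-CoGrandis | enumerate_list.py | enumerate_backwards
-- ===== SOURCE A (Python) =====
-- def enumerate_backwards(lst):
--     """
--     Igual que enumerate_list, pero cada palabra debe estar escrita al reves.
--     Los strings vacios se deben saltear.
--
--     Ejemplo: enumerate_backwards(["Red", "Green", ""]) -> ["0. deR", "1. neerG"]
--     """
--     new_lst = []
--     for element in lst:
--         if element != "":
--             new_lst.append(element)
--
--     for index, element in enumerate(new_lst):
--         new_lst[index] = f"{index}. {element[::-1]}"
--
--
--     return new_lst
-- ===== SOURCE B (Python) =====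
-- def enumerate_backwards(lst):
--     result = []
--     i = 0
--     for element in lst:
--         if element != "":
--             result.append(f"{i}. {element[::-1]}")
--             i += 1
--     return result
-- ===== Notes on version B (the rewrite author's own statement) =====
-- stated objective: simpler
-- what changed: A builds a filtered intermediate list and then makes a second enumerate pass overwriting each slot in place; B is a single loop with a manual counter that emits each formatted string directly, with no intermediate list and no mutation.
import Mathlib
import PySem

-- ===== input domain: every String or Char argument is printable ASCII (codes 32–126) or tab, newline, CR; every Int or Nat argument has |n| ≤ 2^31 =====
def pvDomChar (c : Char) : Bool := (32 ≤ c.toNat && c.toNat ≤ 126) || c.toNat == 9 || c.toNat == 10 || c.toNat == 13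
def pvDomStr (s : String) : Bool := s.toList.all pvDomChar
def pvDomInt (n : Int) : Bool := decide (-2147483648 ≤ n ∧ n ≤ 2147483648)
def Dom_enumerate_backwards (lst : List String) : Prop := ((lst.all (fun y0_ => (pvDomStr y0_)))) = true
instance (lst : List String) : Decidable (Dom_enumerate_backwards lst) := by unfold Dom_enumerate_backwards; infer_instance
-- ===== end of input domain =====

-- B fuses A's two passes (filter, then enumerate-and-overwrite) into one loop with a manual
-- counter; objective: simpler (one traversal, no intermediate list), not claimed faster.

-- f"{i}. {element[::-1]}" — built on List Char (element[::-1] is exactly List.reverse of the chars)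
def pvFmt (i : Nat) (s : String) : String :=
  String.ofList (PySem.Int.toChars (i : Int) ++ ". ".toList ++ s.toList.reverse)

-- ===== PORT A =====
-- second loop of A: 'for index, element in enumerate(new_lst): new_lst[index] = …'
-- (enumerate walks the live list; each step reads position i, then overwrites it)
def pvALoop (l : List String) (i : Nat) : List String :=
  if h : i < l.length then
    pvALoop (PySem.List.pySetD l (i : Int) (pvFmt i l[i])) (i + 1)
  else l
termination_by l.length - i
decreasing_by simp [PySem.List.pySetD_natCast]; omega

def enumerate_backwards (lst : List String) : List String :=
  let new_lst := lst.foldl (fun acc e => if e ≠ "" then acc ++ [e] else acc) []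
  pvALoop new_lst 0

-- ===== PORT B =====
def enumerate_backwards_alt (lst : List String) : List String :=
  go lst 0
where
  go : List String → Nat → List String
    | [], _ => []
    | e :: rest, i =>
      if e ≠ "" then pvFmt i e :: go rest (i + 1) else go rest i

-- ===== PRECONDITION & SPEC =====
def Spec_enumerate_backwards (lst : List String) (out : List String) : Prop := out = enumerate_backwards_alt lst
instance (lst : List String) (out : List String) : Decidable (Spec_enumerate_backwards lst out) := by unfold Spec_enumerate_backwards; infer_instance

-- ===== CLAIM (what is proved, stated in full; the proofs are below) =====
def Claim_equal_enumerate_backwards : Prop := ∀ (lst : List String), Dom_enumerate_backwards lst → Spec_enumerate_backwards lst (enumerate_backwards lst)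

-- ===== LEMMAS AND PROOFS =====

-- reference shape: pvFmt applied along the list with indices from i
def pvSpecMap (i : Nat) : List String → List String
  | [] => []
  | s :: r => pvFmt i s :: pvSpecMap (i + 1) r

lemma pvALoop_eq (l : List String) (i : Nat) :
    pvALoop l i = l.take i ++ pvSpecMap i (l.drop i) := by
  by_cases h : i < l.length
  · rw [pvALoop]
    simp only [h, dif_pos, PySem.List.pySetD_natCast]
    rw [pvALoop_eq]
    have hdrop : l.drop i = l[i] :: l.drop (i + 1) :=
      (List.drop_eq_getElem_cons h)
    rw [List.drop_set_of_lt (by omega : i < i + 1), hdrop]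
    have htake : (l.set i (pvFmt i l[i])).take (i + 1)
        = l.take i ++ [pvFmt i l[i]] := by
      rw [List.take_add_one, List.take_set_of_le (le_refl i)]
      simp [h]
    rw [htake]
    simp [pvSpecMap]
  · rw [pvALoop]
    simp only [h]
    rw [List.take_of_length_le (by omega), List.drop_of_length_le (by omega)]
    simp [pvSpecMap]
termination_by l.length - i
decreasing_by simp; omega

lemma pvAlt_go_eq (l : List String) (i : Nat) :
    enumerate_backwards_alt.go l i = pvSpecMap i (l.filter (fun s => s ≠ "")) := by
  induction l generalizing i with
  | nil => simp [enumerate_backwards_alt.go, pvSpecMap]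
  | cons e rest ih =>
    by_cases h : e = ""
    · simp [enumerate_backwards_alt.go, h, List.filter, ih]
    · simp [enumerate_backwards_alt.go, h, List.filter, ih, pvSpecMap]

-- ===== VERDICT (by name: the statement is the Claim_ definition above) =====
theorem enumerate_backwards_spec : Claim_equal_enumerate_backwards := by
  intro lst _
  unfold Spec_enumerate_backwards enumerate_backwards enumerate_backwards_alt
  show pvALoop (lst.foldl (fun acc e => if e ≠ "" then acc ++ [e] else acc) []) 0
      = enumerate_backwards_alt.go lst 0
  rw [PySem.List.foldl_append_ite_eq_filter, pvALoop_eq, pvAlt_go_eq]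
  simp
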